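-- pv_equiv track=rewrite | github.com/Chiggy-Playz/AdventOfCode | 2025/day06.py | part1
-- ===== SOURCE A (Python) =====
-- from operator import add, mul
-- from typing import TypeAlias
--
-- InputType: TypeAlias = list[str]
--
-- def part1(lines: InputType):
--     ops = []
--     results = []
--     for op in lines[-1].split():
--         op = op.strip()
--         ops.append(add if op == "+" else mul)
--         results.append(0 if op == "+" else 1)
--
--     for line in lines[:-1]:
--         line = line.split()
--         nums = map(int, line)
--         for i, num in enumerate(nums):
--             results[i] = ops[i](num, results[i])
--
--     return sum(results)
-- ===== SOURCE B (Python) =====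
-- from operator import add, mul
-- from functools import reduce
--
-- def part1(lines):
--     tokens = [t.strip() for t in lines[-1].split()]
--     ops = [add if t == "+" else mul for t in tokens]
--     seeds = [0 if t == "+" else 1 for t in tokens]
--     cols = [[] for _ in ops]
--     for line in lines[:-1]:
--         for i, num in enumerate(map(int, line.split())):
--             cols[i].append(num)
--     return sum(reduce(ops[i], cols[i], seeds[i]) for i in range(len(ops)))
-- ===== Notes on version B (the rewrite author's own statement) =====
-- stated objective: idiomatic
-- what changed: A interleaves accumulation (updating results[i] in place while scanning each row); B first gathers the numbers into a per-column table in one pass and then reduces each column with functools.reduce seeded by the operator's identity.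
import Mathlib
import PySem

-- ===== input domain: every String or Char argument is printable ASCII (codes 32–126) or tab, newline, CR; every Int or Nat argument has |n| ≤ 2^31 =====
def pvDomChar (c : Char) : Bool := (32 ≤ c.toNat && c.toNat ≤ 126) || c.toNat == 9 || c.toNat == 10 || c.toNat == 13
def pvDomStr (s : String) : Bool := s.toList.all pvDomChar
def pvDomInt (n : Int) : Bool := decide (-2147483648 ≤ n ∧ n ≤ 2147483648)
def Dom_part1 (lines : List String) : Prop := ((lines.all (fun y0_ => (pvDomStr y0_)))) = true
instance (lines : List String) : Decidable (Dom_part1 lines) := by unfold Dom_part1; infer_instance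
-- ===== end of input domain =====

-- B replaces A's interleaved per-row accumulator updates by building a per-column table first
-- and then reducing each column with its operator (idiomatic two-phase decomposition).
-- The `(fun a _ => a)` defaults of pyGetD are dummies for the IndexError cases excluded by Pre_part1.

-- ===== PORT A =====
-- inner loop 'for i, num in enumerate(nums): results[i] = ops[i](num, results[i])'
def part1RowStep (ops : List (Int → Int → Int)) (results : List Int) (line : String) : List Int :=
  let nums := (PySem.Str.split₀ line).map (fun s => (PySem.Int.ofStr? s).getD 0)
  (PySem.List.enumerate nums 0).foldl
    (fun res p =>
      PySem.List.pySetD res p.1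
        ((PySem.List.pyGetD ops p.1 (fun a _ => a)) p.2 (PySem.List.pyGetD res p.1 0)))
    results

def part1 (lines : List String) : Int :=
  let opsResults :=
    (PySem.Str.split₀ ((PySem.List.pyGet? lines (-1)).getD "")).foldl
      (fun (st : List (Int → Int → Int) × List Int) tok =>
        let op := PySem.Str.strip tok
        (st.1 ++ [if op == "+" then (· + ·) else (· * ·)],
         st.2 ++ [if op == "+" then (0 : Int) else 1]))
      ([], [])
  ((PySem.List.slice lines none (some (-1))).foldl (part1RowStep opsResults.1) opsResults.2).sum

-- ===== PORT B =====
-- inner loop 'for i, num in enumerate(map(int, line.split())): cols[i].append(num)'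
def part1AltColStep (cols : List (List Int)) (line : String) : List (List Int) :=
  (PySem.List.enumerate ((PySem.Str.split₀ line).map (fun s => (PySem.Int.ofStr? s).getD 0)) 0).foldl
    (fun cs p => PySem.List.pySetD cs p.1 (PySem.List.pyGetD cs p.1 [] ++ [p.2])) cols

def part1_alt (lines : List String) : Int :=
  let tokens := (PySem.Str.split₀ ((PySem.List.pyGet? lines (-1)).getD "")).map PySem.Str.strip
  let ops := tokens.map (fun t => if t == "+" then (· + · : Int → Int → Int) else (· * ·))
  let seeds := tokens.map (fun t => if t == "+" then (0 : Int) else 1)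
  let cols := (PySem.List.slice lines none (some (-1))).foldl part1AltColStep
      (ops.map (fun _ => ([] : List Int)))
  ((PySem.List.pyRange 0 (ops.length : Int) 1).map
    (fun i =>
      (PySem.List.pyGetD cols i []).foldl (PySem.List.pyGetD ops i (fun a _ => a))
        (PySem.List.pyGetD seeds i 0))).sum

-- ===== PRECONDITION & SPEC =====
-- Pre_ excludes exactly the inputs where A raises: empty `lines` (IndexError on lines[-1]),
-- a data row with more tokens than the operator row (IndexError on results[i]), and a token
-- int() rejects (ValueError). A returns on every other input.
def Pre_part1 (lines : List String) : Prop :=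
  lines ≠ [] ∧
  ∀ line ∈ lines.dropLast,
    (PySem.Str.split₀ line).length ≤ (PySem.Str.split₀ (lines.getLast?.getD "")).length ∧
    ∀ t ∈ PySem.Str.split₀ line, (PySem.Int.ofStr? t).isSome = true
instance (lines : List String) : Decidable (Pre_part1 lines) := by unfold Pre_part1; infer_instance

def pvWitness_part1 : List String := ["1 2", "3 4", "+ *"]

def Spec_part1 (lines : List String) (out : Int) : Prop := out = part1_alt lines
instance (lines : List String) (out : Int) : Decidable (Spec_part1 lines out) := by
  unfold Spec_part1; infer_instance

-- ===== CLAIM (what is proved, stated in full; the proofs are below) =====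
def Claim_equal_part1 : Prop :=
  ∀ (lines : List String), Dom_part1 lines → Pre_part1 lines → Spec_part1 lines (part1 lines)

-- ===== LEMMAS AND PROOFS =====

theorem pv_getD_set_self {α : Type} (l : List α) (i : Nat) (v d : α) (h : i < l.length) :
    (l.set i v).getD i d = v := by
  rw [List.getD_eq_getElem?_getD, List.getElem?_set_self h]; rfl

theorem pv_getD_set_ne {α : Type} (l : List α) (i j : Nat) (v d : α) (h : i ≠ j) :
    (l.set i v).getD j d = l.getD j d := by
  rw [List.getD_eq_getElem?_getD, List.getElem?_set_ne h, ← List.getD_eq_getElem?_getD]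

-- A's operator/seed-building loop over a pair of accumulators, as two maps
theorem pv_build (toks : List String) :
    toks.foldl (fun (st : List (Int → Int → Int) × List Int) tok =>
        let op := PySem.Str.strip tok
        (st.1 ++ [if op == "+" then (· + ·) else (· * ·)],
         st.2 ++ [if op == "+" then (0 : Int) else 1])) ([], [])
      = (toks.map (fun tok => if PySem.Str.strip tok == "+" then (· + ·) else (· * ·)),
         toks.map (fun tok => if PySem.Str.strip tok == "+" then (0 : Int) else 1)) := by
  rw [PySem.List.foldl_prod_mk
      (fun (s : List (Int → Int → Int)) tok =>
        s ++ [if PySem.Str.strip tok == "+" then (· + ·) else (· * ·)])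
      (fun (s : List Int) tok =>
        s ++ [if PySem.Str.strip tok == "+" then (0 : Int) else 1]) toks [] []]
  simp only [PySem.List.foldl_append_singleton_eq_map, List.nil_append]

-- one row, both inner loops in lockstep: A's results stay the G-image of B's columns
theorem pv_joint_inv (fA : Int → Int → Int → Int) (G : Nat → List Int → Int)
    (hG : ∀ (k : Nat) (col : List Int) (x : Int), G k (col ++ [x]) = fA (k : Int) x (G k col)) :
    ∀ (nums : List Int) (s : Nat) (res : List Int) (cols : List (List Int)),
    res.length = cols.length → s + nums.length ≤ res.length →
    (∀ k : Nat, res.getD k 0 = G k (cols.getD k [])) →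
    ((PySem.List.enumerate nums (s : Int)).foldl
        (fun r p => PySem.List.pySetD r p.1 (fA p.1 p.2 (PySem.List.pyGetD r p.1 0))) res).length
        = res.length ∧
    ((PySem.List.enumerate nums (s : Int)).foldl
        (fun cs p => PySem.List.pySetD cs p.1 (PySem.List.pyGetD cs p.1 [] ++ [p.2])) cols).length
        = cols.length ∧
    ∀ k : Nat,
      ((PySem.List.enumerate nums (s : Int)).foldl
          (fun r p => PySem.List.pySetD r p.1 (fA p.1 p.2 (PySem.List.pyGetD r p.1 0))) res).getD k 0
        = G k (((PySem.List.enumerate nums (s : Int)).foldl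
          (fun cs p => PySem.List.pySetD cs p.1 (PySem.List.pyGetD cs p.1 [] ++ [p.2])) cols).getD k []) := by
  intro nums
  induction nums with
  | nil =>
    intro s res cols _ _ hinv
    exact ⟨rfl, rfl, hinv⟩
  | cons x xs ih =>
    intro s res cols hlen hb hinv
    have hs : s < res.length := by simp at hb; omega
    have hs' : s < cols.length := by omega
    rw [PySem.List.enumerate_cons]
    simp only [List.foldl_cons, PySem.List.pySetD_natCast, PySem.List.pyGetD_natCast]
    have hcast : (s : Int) + 1 = ((s + 1 : Nat) : Int) := by push_cast; ring
    rw [hcast]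
    have hnext := ih (s + 1) (res.set s (fA (s : Int) x (res.getD s 0)))
        (cols.set s (cols.getD s [] ++ [x]))
        (by simp [hlen]) (by simp at hb ⊢; omega)
        (by
          intro k
          by_cases hk : k = s
          · subst hk
            rw [pv_getD_set_self _ _ _ _ hs, pv_getD_set_self _ _ _ _ hs', hG, hinv]
          · rw [pv_getD_set_ne _ _ _ _ _ (Ne.symm hk), pv_getD_set_ne _ _ _ _ _ (Ne.symm hk)]
            exact hinv k)
    exact ⟨by rw [hnext.1]; simp, by rw [hnext.2.1]; simp, hnext.2.2⟩

-- all rows: chaining the one-row lemma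
theorem pv_rows_inv (ops : List (Int → Int → Int)) (G : Nat → List Int → Int)
    (hG : ∀ (k : Nat) (col : List Int) (x : Int),
      G k (col ++ [x]) = (PySem.List.pyGetD ops (k : Int) (fun a _ => a)) x (G k col)) :
    ∀ (rows : List String) (res : List Int) (cols : List (List Int)),
    res.length = cols.length →
    (∀ line ∈ rows, (PySem.Str.split₀ line).length ≤ res.length) →
    (∀ k : Nat, res.getD k 0 = G k (cols.getD k [])) →
    (rows.foldl (part1RowStep ops) res).length = res.length ∧
    (rows.foldl part1AltColStep cols).length = cols.length ∧
    ∀ k : Nat,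
      (rows.foldl (part1RowStep ops) res).getD k 0
        = G k ((rows.foldl part1AltColStep cols).getD k []) := by
  intro rows
  induction rows with
  | nil => intro res cols _ _ hinv; exact ⟨rfl, rfl, hinv⟩
  | cons line rest ih =>
    intro res cols hlen hrow hinv
    simp only [List.foldl_cons]
    have hnum : ((PySem.Str.split₀ line).map (fun s => (PySem.Int.ofStr? s).getD 0)).length
        ≤ res.length := by
      simp only [List.length_map]
      exact hrow line (by simp)
    have hj := pv_joint_inv
        (fun i x prev => (PySem.List.pyGetD ops i (fun a _ => a)) x prev) G hG
        ((PySem.Str.split₀ line).map (fun s => (PySem.Int.ofStr? s).getD 0))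
        0 res cols hlen (by simpa using hnum) hinv
    have hA : part1RowStep ops res line
        = (PySem.List.enumerate
            ((PySem.Str.split₀ line).map (fun s => (PySem.Int.ofStr? s).getD 0)) ((0 : Nat) : Int)).foldl
          (fun r p => PySem.List.pySetD r p.1
            ((fun i x prev => (PySem.List.pyGetD ops i (fun a _ => a)) x prev) p.1 p.2
              (PySem.List.pyGetD r p.1 0))) res := by
      simp [part1RowStep]
    have hB : part1AltColStep cols line
        = (PySem.List.enumerate
            ((PySem.Str.split₀ line).map (fun s => (PySem.Int.ofStr? s).getD 0)) ((0 : Nat) : Int)).foldl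
          (fun cs p => PySem.List.pySetD cs p.1 (PySem.List.pyGetD cs p.1 [] ++ [p.2])) cols := by
      simp [part1AltColStep]
    rw [hA, hB]
    have hrest := ih _ _ (by rw [hj.1, hj.2.1]; exact hlen)
      (by intro l hl; rw [hj.1]; exact hrow l (by simp [hl])) hj.2.2
    exact ⟨by rw [hrest.1, hj.1], by rw [hrest.2.1, hj.2.1], hrest.2.2⟩

-- a fold with a pointwise-commutative operator may take its arguments in either order
theorem pv_foldl_flip (f : Int → Int → Int) (h : ∀ a b, f a b = f b a) :
    ∀ (l : List Int) (s : Int), l.foldl (fun a x => f x a) s = l.foldl f s := by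
  intro l
  induction l with
  | nil => intro s; rfl
  | cons x xs ih => intro s; simp only [List.foldl_cons, h x s]; exact ih (f s x)

-- a list is the range-map of its own entries
theorem pv_list_eq_range_map (r : List Int) :
    r = (List.range r.length).map (fun k => r.getD k 0) := by
  apply List.ext_getElem
  · simp
  · intro i h1 h2
    simp only [List.getElem_map, List.getElem_range]
    rw [List.getD_eq_getElem?_getD, List.getElem?_eq_getElem h1]
    rfl

theorem pv_getD_map_const_nil (l : List (Int → Int → Int)) (k : Nat) :
    (l.map (fun _ => ([] : List Int))).getD k [] = [] := by
  rw [List.getD_eq_getElem?_getD, List.getElem?_map]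
  cases l[k]? <;> rfl

-- ===== VERDICT (by name: the statement is the Claim_ definition above) =====
theorem part1_spec : Claim_equal_part1 := by
  intro lines _ hpre
  obtain ⟨hne, hrows⟩ := hpre
  unfold Spec_part1 part1 part1_alt
  simp only [PySem.List.pyGet?_neg_one, PySem.List.slice_to_neg_one]
  rw [pv_build]
  set toks := PySem.Str.split₀ (lines.getLast?.getD "") with htoks
  have hEq1 : toks.map (fun tok =>
        if PySem.Str.strip tok == "+" then (· + · : Int → Int → Int) else (· * ·))
      = (toks.map PySem.Str.strip).map
          (fun t => if t == "+" then (· + · : Int → Int → Int) else (· * ·)) := by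
    rw [List.map_map]; rfl
  have hEq2 : toks.map (fun tok => if PySem.Str.strip tok == "+" then (0 : Int) else 1)
      = (toks.map PySem.Str.strip).map (fun t => if t == "+" then (0 : Int) else 1) := by
    rw [List.map_map]; rfl
  rw [hEq1, hEq2]
  set ops := (toks.map PySem.Str.strip).map
      (fun t => if t == "+" then (· + · : Int → Int → Int) else (· * ·)) with hops
  set seeds := (toks.map PySem.Str.strip).map (fun t => if t == "+" then (0 : Int) else 1)
      with hseeds
  set G : Nat → List Int → Int :=
    fun k col => col.foldl (fun a x => (ops.getD k (fun a _ => a)) x a) (seeds.getD k 0) with hGdef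
  have hG : ∀ (k : Nat) (col : List Int) (x : Int),
      G k (col ++ [x]) = (PySem.List.pyGetD ops (k : Int) (fun a _ => a)) x (G k col) := by
    intro k col x
    rw [PySem.List.pyGetD_natCast, hGdef]
    simp [List.foldl_append]
  have hmain := pv_rows_inv ops G hG lines.dropLast seeds (ops.map (fun _ => ([] : List Int)))
    (by simp [hops, hseeds])
    (by
      intro line hl
      have hb := (hrows line hl).1
      simpa [hseeds] using hb)
    (by
      intro k
      rw [pv_getD_map_const_nil, hGdef]; rfl)
  set R := lines.dropLast.foldl (part1RowStep ops) seeds with hR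
  set C := lines.dropLast.foldl part1AltColStep (ops.map (fun _ => ([] : List Int))) with hC
  have hRlen : R.length = toks.length := by rw [hmain.1, hseeds]; simp
  rw [pv_list_eq_range_map R, hRlen]
  rw [show (ops.length : Int) = ((toks.length : Nat) : Int) by rw [hops]; simp,
    PySem.List.pyRange_zero_natCast, List.map_map]
  congr 1
  apply List.map_congr_left
  intro k hk
  have hk' : k < toks.length := List.mem_range.mp hk
  simp only [Function.comp_apply, PySem.List.pyGetD_natCast]
  rw [hmain.2.2 k, hGdef]
  have hkops : k < ops.length := by rw [hops]; simpa using hk'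
  have hall : ∀ f ∈ ops, ∀ a b, f a b = f b a := by
    rw [hops]
    intro f hf
    simp only [List.mem_map] at hf
    obtain ⟨t, _, rfl⟩ := hf
    intro a b
    split_ifs <;> ring
  have hcomm : ∀ a b, (ops.getD k (fun a _ => a)) a b = (ops.getD k (fun a _ => a)) b a := by
    intro a b
    rw [List.getD_eq_getElem?_getD, List.getElem?_eq_getElem hkops]
    simp only [Option.getD_some]
    exact hall _ (List.getElem_mem _) a b
  exact pv_foldl_flip _ hcomm _ _
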